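-- pv_equiv track=rewrite | github.com/LeeHyeonKyu/Coding-Practice | Programmers/2017 팁스타운/짝지어 제거하기.py | solution
-- ===== SOURCE A (Python) =====
-- from collections import defaultdict
--
-- def solution(s):
--     char_dict = defaultdict(list)
--     flags = [False] * len(s)
--     for idx, char in enumerate(s):
--         if len(char_dict[char]) > 0:
--             front = char_dict[char].pop()
--             if all(flags[front+1:idx]):
--                 flags[front] = True
--                 flags[idx] = True
--             else:
--                 char_dict[char].append(front)
--                 char_dict[char].append(idx)
--         else:
--             char_dict[char].append(idx)
--
--     return 1 if all(flags) else 0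
-- ===== SOURCE B (Python) =====
-- def solution(s):
--     stack = []
--     for char in s:
--         if stack and stack[-1] == char:
--             stack.pop()
--         else:
--             stack.append(char)
--     return 1 if not stack else 0
-- ===== Notes on version B (the rewrite author's own statement) =====
-- stated objective: faster
-- what changed: Replaces the per-character dict of index lists with quadratic slice scans (all(flags[front+1:idx])) by a single-pass stack that pops when the incoming character equals the top; empty stack at the end means fully reducible.
import Mathlib
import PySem

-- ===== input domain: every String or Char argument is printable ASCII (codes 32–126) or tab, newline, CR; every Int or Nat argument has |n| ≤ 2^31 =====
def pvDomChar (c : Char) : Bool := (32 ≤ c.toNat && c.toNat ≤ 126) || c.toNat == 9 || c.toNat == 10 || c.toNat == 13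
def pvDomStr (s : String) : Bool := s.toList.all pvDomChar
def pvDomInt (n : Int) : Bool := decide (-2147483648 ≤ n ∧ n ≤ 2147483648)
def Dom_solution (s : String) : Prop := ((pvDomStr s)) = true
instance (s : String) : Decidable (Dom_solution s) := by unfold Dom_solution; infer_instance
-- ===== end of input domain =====

-- B replaces A's dict-of-index-lists with quadratic slice checks by a single-pass stack (objective: faster, asymptotic).

-- ===== PORT A =====
-- one iteration of A's for-loop: state = (char_dict, flags), input = (idx, char)
def solStepA (st : PySem.Dict Char (List Int) × List Bool) (p : Int × Char) :
    PySem.Dict Char (List Int) × List Bool :=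
  let d := st.1
  let flags := st.2
  let idx := p.1
  let char := p.2
  let cur := d.getD char []          -- char_dict[char]  (defaultdict: missing key reads as [])
  if cur.length > 0 then
    match PySem.List.pop? cur (-1) with          -- front = char_dict[char].pop()
    | some (front, rest) =>
      if (PySem.List.slice flags (some (front + 1)) (some idx)).all id then
        (d.insert char rest,
         PySem.List.pySetD (PySem.List.pySetD flags front true) idx true)
      else
        (d.insert char (rest ++ [front, idx]), flags)
    | none => st                                   -- unreachable: cur.length > 0
  else
    (d.insert char (cur ++ [idx]), flags)          -- char_dict[char].append(idx)

def solution (s : String) : Int :=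
  let cs := s.toList
  let init : PySem.Dict Char (List Int) × List Bool :=
    (PySem.Dict.empty, List.replicate cs.length false)
  let fin := (PySem.List.enumerate cs 0).foldl solStepA init
  if fin.2.all id then 1 else 0

-- ===== PORT B =====
-- one iteration of B's for-loop (stack kept top-first)
def solStepB (stack : List Char) (char : Char) : List Char :=
  match stack with
  | top :: rest => if top = char then rest else char :: top :: rest
  | [] => [char]

def solution_alt (s : String) : Int :=
  let stack := s.toList.foldl solStepB []
  if stack.isEmpty then 1 else 0

-- ===== PRECONDITION & SPEC =====
def Spec_solution (s : String) (out : Int) : Prop := out = solution_alt s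
instance (s : String) (out : Int) : Decidable (Spec_solution s out) := by unfold Spec_solution; infer_instance

-- ===== CLAIM (what is proved, stated in full; the proofs are below) =====
def Claim_equal_solution : Prop := ∀ (s : String), Dom_solution s → Spec_solution s (solution s)

-- ===== LEMMAS AND PROOFS =====

-- proof-only helpers: abstraction invariant tying A's (dict, flags) state and B's stack
-- to the list u of (index, char) pairs of the characters processed so far and not yet removed
def InvA (cs : List Char) (k : Nat) (u : List (Nat × Char))
    (d : PySem.Dict Char (List Int)) (flags : List Bool) : Prop :=
  flags.length = cs.length ∧
  u.Pairwise (fun p q => p.1 < q.1) ∧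
  (∀ p ∈ u, p.1 < k ∧ cs[p.1]? = some p.2) ∧
  (∀ (i : Nat) (h : i < flags.length), flags[i] = decide (i < k ∧ i ∉ u.map Prod.fst)) ∧
  (∀ c, d.getD c [] = (u.filter (fun p => p.2 == c)).map (fun p => ((p.1 : Int))))

lemma all_drop_take (l : List Bool) (a t : Nat) :
    ((l.drop a).take t).all id = true ↔
      ∀ (i : Nat) (h : i < l.length), a ≤ i → i < a + t → l[i] = true := by
  rw [List.all_eq_true]
  constructor
  · intro H i h hai hit
    have hmm : l[i] ∈ (l.drop a).take t := by
      rw [List.mem_iff_getElem]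
      refine ⟨i - a, by simp [List.length_take]; omega, ?_⟩
      rw [List.getElem_take, List.getElem_drop]
      congr 1
      omega
    simpa using H _ hmm
  · intro H x hx
    obtain ⟨j, hj, rfl⟩ := List.mem_iff_getElem.mp hx
    rw [List.getElem_take, List.getElem_drop]
    have hjl : j < t ∧ a + j < l.length := by
      simp [List.length_take] at hj; omega
    exact H (a + j) hjl.2 (by omega) (by omega)

lemma inv_push (cs : List Char) (k : Nat) (u : List (Nat × Char)) (d : PySem.Dict Char (List Int))
    (flags : List Bool) (c : Char) (hI : InvA cs k u d flags) (hc : cs[k]? = some c) :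
    InvA cs (k+1) (u ++ [(k, c)])
      (d.insert c ((u.filter (fun p => p.2 == c)).map (fun p => ((p.1 : Int))) ++ [(k : Int)]))
      flags := by
  obtain ⟨hlen, hpw, hmem, hfl, hd⟩ := hI
  refine ⟨hlen, ?_, ?_, ?_, ?_⟩
  · rw [List.pairwise_append]
    exact ⟨hpw, List.pairwise_singleton _ _, fun p hp q hq => by
      simp at hq; subst hq; exact (hmem p hp).1⟩
  · intro p hp
    rcases List.mem_append.mp hp with h | h
    · exact ⟨Nat.lt_succ_of_lt (hmem p h).1, (hmem p h).2⟩
    · simp at h; subst h; exact ⟨Nat.lt_succ_self _, hc⟩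
  · intro i h
    rw [hfl i h, decide_eq_decide]
    simp only [List.map_append, List.mem_append, List.map_cons, List.map_nil,
      List.mem_singleton]
    have hk : ∀ p ∈ u, p.1 < k := fun p hp => (hmem p hp).1
    constructor
    · rintro ⟨h1, h2⟩
      refine ⟨by omega, ?_⟩
      rintro (h' | h')
      · exact h2 h'
      · omega
    · rintro ⟨h1, h2⟩
      have hik : i ≠ k := fun h' => h2 (Or.inr h')
      exact ⟨by omega, fun h' => h2 (Or.inl h')⟩
  · intro c'
    by_cases hcc : c' = c
    · subst hcc
      rw [PySem.Dict.getD_insert_self, List.filter_append]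
      simp
    · rw [PySem.Dict.getD_insert_of_ne _ _ _ hcc, hd c', List.filter_append]
      have hb : (c == c') = false := by simp; exact fun h => hcc h.symm
      simp [hb]

lemma inv_pop (cs : List Char) (k : Nat) (u₀ : List (Nat × Char)) (m : Nat)
    (d : PySem.Dict Char (List Int)) (flags : List Bool) (c : Char)
    (hI : InvA cs k (u₀ ++ [(m, c)]) d flags) (hc : cs[k]? = some c) :
    InvA cs (k+1) u₀
      (d.insert c ((u₀.filter (fun p => p.2 == c)).map (fun p => ((p.1 : Int)))))
      ((flags.set m true).set k true) := by
  obtain ⟨hlen, hpw, hmem, hfl, hd⟩ := hI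
  have hpw0 : u₀.Pairwise (fun p q => p.1 < q.1) := (List.pairwise_append.mp hpw).1
  have hmax : ∀ p ∈ u₀, p.1 < m := fun p hp =>
    (List.pairwise_append.mp hpw).2.2 p hp (m, c) (by simp)
  have hmk : m < k := (hmem (m, c) (by simp)).1
  refine ⟨by simp [hlen], hpw0, ?_, ?_, ?_⟩
  · intro p hp
    have h := hmem p (List.mem_append_left _ hp)
    exact ⟨Nat.lt_succ_of_lt h.1, h.2⟩
  · intro i h
    simp only [List.length_set] at h
    rw [List.getElem_set, List.getElem_set, hfl i h]
    by_cases hik : k = i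
    · subst hik
      have hnk : k ∉ u₀.map Prod.fst := by
        intro hm'; obtain ⟨p, hp, hpk⟩ := List.mem_map.mp hm'
        have := hmax p hp; omega
      simp [hnk]
    · rw [if_neg hik]
      by_cases him : m = i
      · subst him
        have hnm : m ∉ u₀.map Prod.fst := by
          intro hm'; obtain ⟨p, hp, hpk⟩ := List.mem_map.mp hm'
          have := hmax p hp; omega
        simp [hnm]; omega
      · rw [if_neg him, decide_eq_decide]
        simp only [List.map_append, List.mem_append, List.map_cons, List.map_nil,
          List.mem_singleton]
        constructor
        · rintro ⟨h1, h2⟩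
          exact ⟨by omega, fun h' => h2 (Or.inl h')⟩
        · rintro ⟨h1, h2⟩
          refine ⟨by omega, ?_⟩
          rintro (h' | h')
          · exact h2 h'
          · omega
  · intro c'
    by_cases hcc : c' = c
    · subst hcc; rw [PySem.Dict.getD_insert_self]
    · rw [PySem.Dict.getD_insert_of_ne _ _ _ hcc, hd c', List.filter_append]
      have hb : (c == c') = false := by simp; exact fun h => hcc h.symm
      simp [hb]

lemma step_sim (cs : List Char) (k : Nat) (u : List (Nat × Char))
    (d : PySem.Dict Char (List Int)) (flags : List Bool) (c : Char)
    (hI : InvA cs k u d flags) (hc : cs[k]? = some c) :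
    ∃ u', InvA cs (k+1) u'
        (solStepA (d, flags) ((k : Int), c)).1 (solStepA (d, flags) ((k : Int), c)).2 ∧
      solStepB ((u.map Prod.snd).reverse) c = (u'.map Prod.snd).reverse := by
  have hI0 := hI
  obtain ⟨hlen, hpw, hmem, hfl, hd⟩ := hI
  have hkcs : k < cs.length := by
    by_contra h
    rw [List.getElem?_eq_none (by omega)] at hc
    cases hc
  by_cases hfe : u.filter (fun p => p.2 == c) = []
  · -- character c does not occur among the unremoved indices: A appends, B pushes
    have hstep : solStepA (d, flags) ((k:Int), c) =
        (d.insert c ((u.filter (fun p => p.2 == c)).map (fun p => ((p.1 : Int))) ++ [(k : Int)]),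
         flags) := by
      unfold solStepA
      simp only [hd, hfe]
      simp
    refine ⟨u ++ [(k, c)], by rw [hstep]; exact inv_push cs k u d flags c hI0 hc, ?_⟩
    have hnc : ∀ x ∈ u.map Prod.snd, x ≠ c := by
      intro x hx hxc
      obtain ⟨p, hp, rfl⟩ := List.mem_map.mp hx
      have hpf : p ∈ u.filter (fun p => p.2 == c) :=
        List.mem_filter.mpr ⟨hp, by simp [hxc]⟩
      rw [hfe] at hpf
      exact List.not_mem_nil hpf
    cases hst : (u.map Prod.snd).reverse with
    | nil =>
      have hu : u.map Prod.snd = [] := by simpa using congrArg List.reverse hst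
      simp [solStepB, List.map_append, hu]
    | cons top r =>
      have htop : top ≠ c := by
        apply hnc
        rw [← List.mem_reverse, hst]
        exact List.mem_cons_self
      simp [solStepB, List.map_append, List.reverse_append, hst, htop]
  · -- c occurs: A pops front = the last unremoved index of c
    have hune : u ≠ [] := by
      intro h; rw [h] at hfe; exact hfe rfl
    obtain ⟨u₀, q, hu⟩ := (List.eq_nil_or_concat u).resolve_left hune
    rw [List.concat_eq_append] at hu
    subst hu
    obtain ⟨f₀, p, hfp⟩ :=
      (List.eq_nil_or_concat ((u₀ ++ [q]).filter (fun p => p.2 == c))).resolve_left hfe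
    rw [List.concat_eq_append] at hfp
    have hpmem : p ∈ (u₀ ++ [q]).filter (fun p => p.2 == c) := by rw [hfp]; simp
    have hpc : p.2 = c := by simpa using (List.of_mem_filter hpmem)
    obtain ⟨m, c₂⟩ := p
    simp only at hpc
    subst c₂
    have hmu : (m, c) ∈ u₀ ++ [q] := List.mem_of_mem_filter hpmem
    have hqmax : ∀ p' ∈ u₀, p'.1 < q.1 := fun p' hp' =>
      (List.pairwise_append.mp hpw).2.2 p' hp' q (by simp)
    have hmle : m ≤ q.1 := by
      rcases List.mem_append.mp hmu with h' | h'
      · exact Nat.le_of_lt (hqmax _ h')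
      · rw [List.mem_singleton] at h'
        rw [← h']
    have hmk : m < k := (hmem (m, c) hmu).1
    have hqk : q.1 < k := (hmem q (by simp)).1
    have hcur : d.getD c [] = f₀.map (fun p => ((p.1 : Int))) ++ [(m : Int)] := by
      rw [hd c, hfp]; simp
    have hslice : PySem.List.slice flags (some ((m:Int) + 1)) (some (k:Int)) =
        (flags.drop (m+1)).take (k - (m+1)) := by
      have h := PySem.List.slice_natCast flags (m+1) k
      push_cast at h
      rw [h]
    by_cases hqm : q.1 = m
    · -- front is the top of the stack: everything between is removed; A marks, B pops
      have hnodup : (List.map Prod.fst (u₀ ++ [q])).Nodup := by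
        have hp' : (List.map Prod.fst (u₀ ++ [q])).Pairwise (· < ·) :=
          List.pairwise_map.mpr hpw
        exact hp'.imp Nat.ne_of_lt
      have hqeq : q = (m, c) :=
        List.inj_on_of_nodup_map hnodup (by simp) hmu (by rw [hqm])
      have hcond : ((flags.drop (m+1)).take (k - (m+1))).all id = true := by
        rw [all_drop_take]
        intro i hi h1 h2
        rw [hfl i hi]
        apply decide_eq_true
        refine ⟨by omega, ?_⟩
        intro hin
        obtain ⟨p', hp', hp1⟩ := List.mem_map.mp hin
        rcases List.mem_append.mp hp' with h' | h'
        · have := hqmax p' h'; omega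
        · simp at h'; rw [h', hqeq] at hp1; simp at hp1; omega
      have hfu : (u₀ ++ [q]).filter (fun p => p.2 == c) =
          u₀.filter (fun p => p.2 == c) ++ [(m, c)] := by
        rw [List.filter_append, hqeq]; simp
      have hf0 : f₀ = u₀.filter (fun p => p.2 == c) := by
        have h := hfp.symm.trans hfu
        have h2 := congrArg List.dropLast h
        simpa [List.dropLast_concat] using h2
      have hstep : solStepA (d, flags) ((k:Int), c) =
          (d.insert c (f₀.map (fun p => ((p.1 : Int)))),
           PySem.List.pySetD (PySem.List.pySetD flags (m:Int) true) (k:Int) true) := by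
        unfold solStepA
        simp only [hcur, PySem.List.pop?_last]
        simp [hslice, hcond]
      have hIpop := inv_pop cs k u₀ m d flags c (by rw [← hqeq]; exact hI0) hc
      refine ⟨u₀, ?_, ?_⟩
      · rw [hstep, hf0]
        simpa [PySem.List.pySetD_natCast] using hIpop
      · simp [solStepB, hqeq, List.map_append, List.reverse_append]
    · -- front is buried: something unremoved lies between; A pushes back, B pushes
      have hmltq : m < q.1 := by omega
      have hcond : ((flags.drop (m+1)).take (k - (m+1))).all id = false := by
        rcases Bool.eq_false_or_eq_true (((flags.drop (m+1)).take (k - (m+1))).all id) with h | h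
        · exfalso
          rw [all_drop_take] at h
          have hq1 := h q.1 (by omega) (by omega) (by omega)
          rw [hfl q.1 (by omega), decide_eq_true_eq] at hq1
          exact hq1.2 (List.mem_map.mpr ⟨q, by simp, rfl⟩)
        · exact h
      have hstep : solStepA (d, flags) ((k:Int), c) =
          (d.insert c (f₀.map (fun p => ((p.1 : Int))) ++ [(m:Int), (k:Int)]), flags) := by
        unfold solStepA
        simp only [hcur, PySem.List.pop?_last]
        simp [hslice, hcond]
      have hval : f₀.map (fun p => ((p.1 : Int))) ++ [(m:Int), (k:Int)] =
          ((u₀ ++ [q]).filter (fun p => p.2 == c)).map (fun p => ((p.1 : Int))) ++ [(k:Int)] := by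
        rw [hfp]; simp
      have hq2 : q.2 ≠ c := by
        intro h2
        have hqf : q ∈ (u₀ ++ [q]).filter (fun p => p.2 == c) :=
          List.mem_filter.mpr ⟨by simp, by simp [h2]⟩
        rw [hfp] at hqf
        rcases List.mem_append.mp hqf with h' | h'
        · have hpwf : ((u₀ ++ [q]).filter (fun p => p.2 == c)).Pairwise (fun p q => p.1 < q.1) :=
            hpw.filter _
          rw [hfp] at hpwf
          have := (List.pairwise_append.mp hpwf).2.2 q h' (m, c) (by simp)
          simp at this; omega
        · rw [List.mem_singleton] at h'
          exact hqm (by rw [h'])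
      refine ⟨(u₀ ++ [q]) ++ [(k, c)], ?_, ?_⟩
      · rw [hstep, hval]
        exact inv_push cs k (u₀ ++ [q]) d flags c hI0 hc
      · simp [solStepB, List.map_append, List.reverse_append, hq2]

lemma fold_sim (cs : List Char) (rest : List Char) : ∀ (k : Nat) (u : List (Nat × Char))
    (d : PySem.Dict Char (List Int)) (flags : List Bool),
    cs.drop k = rest → InvA cs k u d flags →
    ∃ u', InvA cs (k + rest.length) u'
        ((PySem.List.enumerate rest (k : Int)).foldl solStepA (d, flags)).1
        ((PySem.List.enumerate rest (k : Int)).foldl solStepA (d, flags)).2 ∧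
      rest.foldl solStepB ((u.map Prod.snd).reverse) = (u'.map Prod.snd).reverse := by
  induction rest with
  | nil => intro k u d flags _ hI; exact ⟨u, by simpa [PySem.List.enumerate] using hI, rfl⟩
  | cons c rest' ih =>
    intro k u d flags hdrop hI
    have hck : cs[k]? = some c := by
      have h1 : (cs.drop k)[0]? = some c := by rw [hdrop]; rfl
      rwa [List.getElem?_drop, Nat.add_zero] at h1
    obtain ⟨u₁, hI₁, hB₁⟩ := step_sim cs k u d flags c hI hck
    have hdrop' : cs.drop (k+1) = rest' := by
      have h := congrArg List.tail hdrop
      rwa [List.tail_drop] at h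
    obtain ⟨u', hI', hB'⟩ := ih (k+1) u₁
      (solStepA (d, flags) ((k : Int), c)).1 (solStepA (d, flags) ((k : Int), c)).2 hdrop' hI₁
    have he : (PySem.List.enumerate (c :: rest') (k : Int)).foldl solStepA (d, flags)
        = (PySem.List.enumerate rest' (((k+1 : Nat)) : Int)).foldl solStepA
            ((solStepA (d, flags) ((k : Int), c)).1, (solStepA (d, flags) ((k : Int), c)).2) := by
      rw [PySem.List.enumerate_cons]
      push_cast
      simp [List.foldl_cons]
    refine ⟨u', ?_, ?_⟩
    · have harith : k + (c :: rest').length = (k+1) + rest'.length := by simp; omega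
      rw [harith, he]
      exact hI'
    · rw [List.foldl_cons, hB₁]
      exact hB'

-- ===== VERDICT (by name: the statement is the Claim_ definition above) =====
theorem solution_spec : Claim_equal_solution := by
  unfold Claim_equal_solution
  intro s _
  unfold Spec_solution solution solution_alt
  have hInit : InvA s.toList 0 [] PySem.Dict.empty (List.replicate s.toList.length false) := by
    refine ⟨by simp, List.Pairwise.nil, by simp, ?_, ?_⟩
    · intro i h; simp
    · intro c; simp [PySem.Dict.getD_empty]
  obtain ⟨u', hI', hB'⟩ := fold_sim s.toList s.toList 0 [] _ _ (by simp) hInit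
  obtain ⟨hlen', hpw', hmem', hfl', hd'⟩ := hI'
  simp only [Nat.cast_zero, Nat.zero_add, List.map_nil, List.reverse_nil] at hlen' hmem' hfl' hB'
  have hflags_all :
      ((PySem.List.enumerate s.toList (0 : Int)).foldl solStepA
        (PySem.Dict.empty, List.replicate s.toList.length false)).2.all id = true ↔ u' = [] := by
    constructor
    · intro H
      cases u' with
      | nil => rfl
      | cons p t =>
        exfalso
        have hp1 : p.1 < s.toList.length := by
          have := (hmem' p (List.mem_cons_self)).1; omega
        have hlt : p.1 <
            ((PySem.List.enumerate s.toList (0 : Int)).foldl solStepA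
              (PySem.Dict.empty, List.replicate s.toList.length false)).2.length := by
          rw [hlen']; exact hp1
        rw [List.all_eq_true] at H
        have h2 := H _ (List.getElem_mem hlt)
        rw [hfl' p.1 hlt] at h2
        simp only [id, decide_eq_true_eq] at h2
        exact h2.2 (List.mem_map.mpr ⟨p, List.mem_cons_self, rfl⟩)
    · intro h
      subst h
      rw [List.all_eq_true]
      intro x hx
      obtain ⟨j, hj, rfl⟩ := List.mem_iff_getElem.mp hx
      rw [hfl' j hj]
      simp only [id, decide_eq_true_eq]
      refine ⟨?_, by simp⟩
      rw [hlen'] at hj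
      omega
  cases u' with
  | nil =>
    simp only [hflags_all.mpr rfl, hB']
    simp
  | cons p t =>
    have hallf : ((PySem.List.enumerate s.toList (0 : Int)).foldl solStepA
        (PySem.Dict.empty, List.replicate s.toList.length false)).2.all id = false := by
      rcases Bool.eq_false_or_eq_true (((PySem.List.enumerate s.toList (0 : Int)).foldl solStepA
        (PySem.Dict.empty, List.replicate s.toList.length false)).2.all id) with h | h
      · cases hflags_all.mp h
      · exact h
    simp only [hallf, hB']
    simp
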